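-- pv_equiv track=rewrite | github.com/onealabdulrahim/Test-Driven-Development-CS112 | Projects/Project6/project4.py | soften
-- ===== SOURCE A (Python) =====
-- def soften(grid):
-- 	row = 0
-- 	count = 0
-- 	while(row < 3):
-- 		col = 0
-- 		while(col < 3):
-- 			if (grid[row][col] != '_' and not(row == 1 and col == 1)):
-- 				count = count + 1
-- 			col = col + 1
-- 		row = row + 1
-- 	return count
-- ===== SOURCE B (Python) =====
-- def soften(grid):
--     cells = [grid[r][c] for r in range(3) for c in range(3)]
--     del cells[4]
--     return 8 - cells.count('_')
-- ===== Notes on version B (the rewrite author's own statement) =====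
-- stated objective: alternative
-- what changed: B materialises the nine cells, deletes the center, and counts the complement (8 minus the number of '_' cells via list.count) instead of A's nested while loops that increment a counter per non-'_' off-center cell.
import Mathlib
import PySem

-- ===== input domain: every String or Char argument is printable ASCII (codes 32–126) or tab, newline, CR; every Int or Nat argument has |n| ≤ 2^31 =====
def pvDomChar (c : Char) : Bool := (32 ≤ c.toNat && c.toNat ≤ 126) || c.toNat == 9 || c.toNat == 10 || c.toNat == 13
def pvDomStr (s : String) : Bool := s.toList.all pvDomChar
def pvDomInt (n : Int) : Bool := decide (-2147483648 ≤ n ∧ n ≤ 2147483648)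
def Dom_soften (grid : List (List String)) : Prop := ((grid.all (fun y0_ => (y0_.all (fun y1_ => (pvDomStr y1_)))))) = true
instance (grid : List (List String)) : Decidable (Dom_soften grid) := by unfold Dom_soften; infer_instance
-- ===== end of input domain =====

-- B gathers the nine cells, deletes the center, and returns 8 minus the count of '_' cells (complement counting), instead of A's per-cell increment with an in-loop center test.


-- cell lookup grid[r][c]; inside Pre_ the indices are in range, so the defaults are never used
def pvCell (grid : List (List String)) (r c : Int) : String :=
  (PySem.List.pyGet? ((PySem.List.pyGet? grid r).getD []) c).getD ""

-- ===== PORT A =====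
-- A's nested while loops over row,col = 0..2, skipping the center inside the loop condition
def soften (grid : List (List String)) : Int :=
  (PySem.List.pyRange 0 3 1).foldl (fun count row =>
    (PySem.List.pyRange 0 3 1).foldl (fun count col =>
      if pvCell grid row col ≠ "_" ∧ ¬(row = 1 ∧ col = 1) then count + 1 else count) count) 0

-- ===== PORT B =====
-- B: list the nine cells, del cells[4] (the center), return 8 - cells.count('_')
def soften_alt (grid : List (List String)) : Int :=
  let cells := (PySem.List.pyRange 0 3 1).flatMap (fun r =>
    (PySem.List.pyRange 0 3 1).map (fun c => pvCell grid r c))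
  let cells := cells.eraseIdx 4
  8 - (PySem.List.count cells "_" : Int)

-- ===== PRECONDITION & SPEC =====
-- Pre_: the Python A indexes grid[r][c] for r,c in 0..2, so it raises IndexError unless the
-- grid has at least 3 rows and each of the first 3 rows has at least 3 entries.
def Pre_soften (grid : List (List String)) : Prop :=
  3 ≤ grid.length ∧ ∀ r ∈ [0, 1, 2], 3 ≤ (grid.getD r []).length
instance (grid : List (List String)) : Decidable (Pre_soften grid) := by unfold Pre_soften; infer_instance

def pvWitness_soften : List (List String) :=
  [["a", "_", "b"], ["_", "c", "d"], ["e", "f", "_"]]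

def Spec_soften (grid : List (List String)) (out : Int) : Prop := out = soften_alt grid
instance (grid : List (List String)) (out : Int) : Decidable (Spec_soften grid out) := by unfold Spec_soften; infer_instance

-- ===== CLAIM (what is proved, stated in full; the proofs are below) =====
def Claim_equal_soften : Prop := ∀ (grid : List (List String)), Dom_soften grid → Pre_soften grid → Spec_soften grid (soften grid)

-- ===== LEMMAS AND PROOFS =====
theorem pyRange03 : PySem.List.pyRange 0 3 1 = [0, 1, 2] := by
  simp [PySem.List.pyRange_one, List.range_succ]

theorem ite_add_one (p : Prop) [Decidable p] (t : Int) :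
    (if p then t + 1 else t) = t + (if p then 1 else 0) := by split_ifs <;> omega

theorem ite_zero_one (p : Prop) [Decidable p] :
    (if p then (0 : Int) else 1) = 1 - (if p then 1 else 0) := by split_ifs <;> ring

-- ===== VERDICT (by name: the statement is the Claim_ definition above) =====
theorem soften_spec : Claim_equal_soften := by
  intro grid _ _
  unfold Spec_soften soften soften_alt
  simp only [pyRange03, List.foldl_cons, List.foldl_nil, List.flatMap_cons, List.flatMap_nil,
    List.map_cons, List.map_nil, List.append_nil, List.cons_append, List.nil_append, ite_add_one]
  norm_num
  simp only [List.count_cons, List.count_nil, beq_iff_eq, Nat.cast_add, Nat.cast_ite,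
    Nat.cast_one, Nat.cast_zero, ite_zero_one]
  ring
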